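-- pv_equiv track=rewrite | github.com/Prometh3uSss/calculo-numerico | src/utilidades/normalizador.py | normalizeHexadecimalNumber
-- ===== SOURCE A (Python) =====
-- def normalizeHexadecimalNumber(inputValue: str) -> str:
--     """
--     Normaliza un número hexadecimal a notación científica.
--     Ejemplos:
--     "1A.3F" -> "1.A3F × 16^1"
--     "-0.00F2" -> "-F.2 × 16^{-3}"
--
--     Args:
--         inputValue: Cadena con número hexadecimal
--
--     Returns:
--         Representación en notación científica hexadecimal
--     """
--     # Manejar signo y convertir a mayúsculas
--     signCharacter = ''
--     if inputValue.startswith('-'):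
--         signCharacter = '-'
--         processedValue = inputValue[1:]
--     elif inputValue.startswith('+'):
--         processedValue = inputValue[1:]
--     else:
--         processedValue = inputValue
--
--     processedValue = processedValue.upper().replace(',', '.')
--
--     # Caso especial: cero
--     if all(char in '0.,' for char in processedValue):
--         return "0"
--
--     # Dividir en parte entera y decimal
--     parts = processedValue.split('.')
--     integerPart = parts[0].lstrip('0') or '0'
--
--     if len(parts) > 1:
--         fractionalPart = parts[1]
--     else:
--         fractionalPart = ""
--
--     # Combinar dígitos significativos
--     significantDigits = integerPart + fractionalPart
--     significantDigits = significantDigits.lstrip('0') or '0'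
--
--     if significantDigits == '0':
--         return "0"
--
--     # Determinar exponente
--     if integerPart != '0':
--         exponentValue = len(integerPart) - 1
--         mantissaValue = significantDigits[0] + '.' + significantDigits[1:]
--     else:
--         for index, char in enumerate(fractionalPart):
--             if char != '0':
--                 exponentValue = -(index + 1)
--                 mantissaValue = fractionalPart[index] + '.' + fractionalPart[index+1:]
--                 break
--
--     # Limpiar mantisa
--     if '.' in mantissaValue:
--         mantissaValue = mantissaValue.rstrip('0').rstrip('.')
--
--     return f"{signCharacter}{mantissaValue} × 16^{exponentValue}"
-- ===== SOURCE B (Python) =====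
-- def normalizeHexadecimalNumber(inputValue: str) -> str:
--     # Sign and canonical form (same preprocessing as the task demands).
--     if inputValue.startswith('-'):
--         sign, body = '-', inputValue[1:]
--     elif inputValue.startswith('+'):
--         sign, body = '', inputValue[1:]
--     else:
--         sign, body = '', inputValue
--     body = body.upper().replace(',', '.')
--
--     parts = body.split('.')
--     digits = parts[0] + (parts[1] if len(parts) > 1 else '')
--     pointPos = len(parts[0])
--
--     # Index of the first significant digit; none means the value is zero.
--     i = next((k for k, c in enumerate(digits) if c != '0'), None)
--     if i is None:
--         return "0"
--
--     exponent = pointPos - 1 - i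
--     mantissa = (digits[i] + '.' + digits[i+1:]).rstrip('0').rstrip('.')
--     return f"{sign}{mantissa} × 16^{exponent}"
-- ===== Notes on version B (the rewrite author's own statement) =====
-- stated objective: simpler
-- what changed: B drops A's zero-guard and its two-way integer/fraction branch: it builds one combined digit string with the decimal-point position, finds the single index of the first nonzero digit, and derives exponent and mantissa from one position formula (zero iff no such index).
import Mathlib
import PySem

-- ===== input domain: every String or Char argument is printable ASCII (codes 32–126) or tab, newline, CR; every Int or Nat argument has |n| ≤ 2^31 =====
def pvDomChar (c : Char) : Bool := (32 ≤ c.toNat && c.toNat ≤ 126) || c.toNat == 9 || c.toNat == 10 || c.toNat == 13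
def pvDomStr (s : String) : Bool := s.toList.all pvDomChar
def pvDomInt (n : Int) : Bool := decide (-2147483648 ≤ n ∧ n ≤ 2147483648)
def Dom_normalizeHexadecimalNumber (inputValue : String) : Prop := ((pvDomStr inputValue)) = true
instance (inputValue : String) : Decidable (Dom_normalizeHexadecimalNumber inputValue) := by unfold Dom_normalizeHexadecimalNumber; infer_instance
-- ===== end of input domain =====

-- B replaces A's integer/fraction branch split by one combined digit string and a single
-- position-based exponent/mantissa formula (objective: simpler); outputs are identical.

-- ===== PORT A =====
-- the `for index, char in enumerate(fractionalPart): if char != '0': …; break` loop of A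
def pvAFindFrac (frac : List Char) : List (Int × Char) → Option (Int × List Char)
  | [] => none
  | (index, ch) :: rest =>
      if ch != '0' then
        match PySem.List.pyGet? frac index with
        | some c => some (-(index + 1), c :: '.' :: PySem.List.slice frac (some (index + 1)) none)
        | none => none   -- unreachable: enumerate indices are in range (Python never raises here)
      else pvAFindFrac frac rest

-- A below the `parts = processedValue.split('.')` line, taking parts.
-- `.lstrip('0')` / `.rstrip('0')` / `.rstrip('.')` (single-char strip sets) are ported exactly as
-- List.dropWhile / List.rdropWhile on that character.
def pvACore (signCharacter : List Char) (parts : List (List Char)) : String :=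
    let ip0 := (parts.headD []).dropWhile (fun c => c == '0')
    let integerPart := if ip0 = [] then ['0'] else ip0
    let fractionalPart := if 1 < parts.length then parts.getD 1 [] else []
    let sd0 := (integerPart ++ fractionalPart).dropWhile (fun c => c == '0')
    let significantDigits := if sd0 = [] then ['0'] else sd0
    if significantDigits = ['0'] then "0"
    else
      let res? :=
        if ¬ (integerPart = ['0']) then
          some (((integerPart.length : Int) - 1),
            significantDigits.headD default :: '.' :: PySem.List.slice significantDigits (some 1) none)
        else pvAFindFrac fractionalPart (PySem.List.enumerate fractionalPart 0)
      match res? with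
      | none => ""   -- unreachable: past the zero guards Python always binds mantissaValue
      | some (exponentValue, m0) =>
        let mantissaValue :=
          if PySem.Chars.isIn ['.'] m0 then
            (m0.rdropWhile (fun c => c == '0')).rdropWhile (fun c => c == '.')
          else m0
        String.ofList (signCharacter ++ mantissaValue ++ " × 16^".toList ++ PySem.Int.toChars exponentValue)

-- A after the sign handling: the upper/replace, the zero guard, the split, then pvACore
def pvATail (signCharacter processedValue0 : List Char) : String :=
  let processedValue := PySem.Chars.replace (PySem.Chars.upper processedValue0) [','] ['.']
  if processedValue.all (fun ch => ch == '0' || ch == '.' || ch == ',') then "0"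
  else pvACore signCharacter (PySem.Chars.splitOn processedValue ['.'])

def normalizeHexadecimalNumber (inputValue : String) : String :=
  let inp := inputValue.toList
  if PySem.Chars.startswith inp ['-'] then pvATail ['-'] (PySem.List.slice inp (some 1) none)
  else if PySem.Chars.startswith inp ['+'] then pvATail [] (PySem.List.slice inp (some 1) none)
  else pvATail [] inp

-- ===== PORT B =====
-- B after the sign handling: one combined digit string, first significant digit by index
-- (`next(... enumerate ...)` = List.findIdx?), one exponent formula.
def pvBCore (sign : List Char) (parts : List (List Char)) : String :=
  let digits := parts.headD [] ++ (if 1 < parts.length then parts.getD 1 [] else [])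
  let pointPos := (parts.headD []).length
  match digits.findIdx? (fun c => c != '0') with
  | none => "0"
  | some i =>
      let exponent : Int := (pointPos : Int) - 1 - (i : Int)
      let mantissa := ((digits.getD i default :: '.' :: PySem.List.slice digits (some ((i : Int) + 1)) none).rdropWhile
          (fun c => c == '0')).rdropWhile (fun c => c == '.')
      String.ofList (sign ++ mantissa ++ " × 16^".toList ++ PySem.Int.toChars exponent)

-- B after the sign handling: the upper/replace and the split, then pvBCore
def pvBTail (sign body0 : List Char) : String :=
  pvBCore sign (PySem.Chars.splitOn (PySem.Chars.replace (PySem.Chars.upper body0) [','] ['.']) ['.'])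

def normalizeHexadecimalNumber_alt (inputValue : String) : String :=
  let inp := inputValue.toList
  if PySem.Chars.startswith inp ['-'] then pvBTail ['-'] (PySem.List.slice inp (some 1) none)
  else if PySem.Chars.startswith inp ['+'] then pvBTail [] (PySem.List.slice inp (some 1) none)
  else pvBTail [] inp

-- ===== PRECONDITION & SPEC =====
def Spec_normalizeHexadecimalNumber (inputValue : String) (out : String) : Prop := out = normalizeHexadecimalNumber_alt inputValue
instance (inputValue : String) (out : String) : Decidable (Spec_normalizeHexadecimalNumber inputValue out) := by unfold Spec_normalizeHexadecimalNumber; infer_instance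

-- ===== CLAIM (what is proved, stated in full; the proofs are below) =====
def Claim_equal_normalizeHexadecimalNumber : Prop := ∀ (inputValue : String), Dom_normalizeHexadecimalNumber inputValue → Spec_normalizeHexadecimalNumber inputValue (normalizeHexadecimalNumber inputValue)

-- ===== LEMMAS AND PROOFS =====

theorem go_replace (fuel : Nat) : ∀ (l acc : List Char), l.length ≤ fuel →
    PySem.Chars.replace.go [','] ['.'] fuel l acc =
      acc.reverse ++ l.map (fun c => if c == ',' then '.' else c) := by
  induction fuel with
  | zero =>
    intro l acc h
    have hl : l = [] := by cases l <;> simp_all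
    subst hl; simp [PySem.Chars.replace.go]
  | succ n ih =>
    intro l acc h
    match l with
    | [] => simp [PySem.Chars.replace.go]
    | c :: t =>
      simp only [PySem.Chars.replace.go]
      by_cases hc : c = ','
      · subst hc
        rw [if_pos (by simp [List.isPrefixOf])]
        simp [ih t _ (by simpa using h)]
      · rw [if_neg (by simp [List.isPrefixOf]; exact fun h => hc h.symm)]
        simp [ih t _ (by simpa using h), hc]

theorem pv_replace_comma (s : List Char) :
    PySem.Chars.replace s [','] ['.'] = s.map (fun c => if c == ',' then '.' else c) := by
  simp [PySem.Chars.replace, go_replace s.length s [] (le_refl _)]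

theorem go_split (fuel : Nat) : ∀ (l cur : List Char) (acc : List (List Char)) (S : List Char),
    l.length ≤ fuel →
    (∀ c ∈ l, c ∈ S) → (∀ c ∈ cur, c ∈ S ∧ c ≠ '.') → (∀ p ∈ acc, ∀ c ∈ p, c ∈ S ∧ c ≠ '.') →
    ∀ p ∈ PySem.Chars.splitOn.go ['.'] fuel l cur acc, ∀ c ∈ p, c ∈ S ∧ c ≠ '.' := by
  induction fuel with
  | zero =>
    intro l cur acc S h hl hcur hacc
    have hnil : l = [] := by cases l <;> simp_all
    subst hnil
    simp only [PySem.Chars.splitOn.go]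
    intro p hp c hc
    rcases List.mem_reverse.mp hp with h'
    rcases List.mem_cons.mp h' with rfl | h''
    · exact hcur c (by simpa using hc)
    · exact hacc p h'' c hc
  | succ n ih =>
    intro l cur acc S h hl hcur hacc
    match l with
    | [] =>
      simp only [PySem.Chars.splitOn.go]
      intro p hp c hc
      rcases List.mem_reverse.mp hp with h'
      rcases List.mem_cons.mp h' with rfl | h''
      · exact hcur c (by simpa using hc)
      · exact hacc p h'' c hc
    | ch :: rest =>
      simp only [PySem.Chars.splitOn.go]
      by_cases hch : ch = '.'
      · subst hch
        rw [if_pos (by simp [List.isPrefixOf])]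
        exact ih rest [] _ S (by simpa using h) (fun c hc => hl c (by simp [hc]))
          (by simp)
          (by intro p hp c hc
              rcases List.mem_cons.mp hp with rfl | h''
              · exact hcur c (by simpa using hc)
              · exact hacc p h'' c hc)
      · rw [if_neg (by simp [List.isPrefixOf]; exact fun h => hch h.symm)]
        exact ih rest (ch :: cur) _ S (by simpa using h) (fun c hc => hl c (by simp [hc]))
          (by intro c hc
              rcases List.mem_cons.mp hc with rfl | h''
              · exact ⟨hl c (by simp), hch⟩
              · exact hcur c h'')
          hacc

theorem pv_splitOn_mem (s : List Char) :
    ∀ piece ∈ PySem.Chars.splitOn s ['.'], ∀ c ∈ piece, c ∈ s ∧ c ≠ '.' := by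
  simpa [PySem.Chars.splitOn] using
    go_split (s.length + 1) s [] [] s (by omega) (fun c hc => hc) (by simp) (by simp)

theorem pv_dropWhile_eq_drop (l : List Char) (i : Nat)
    (hall : ∀ m (_hm : m < i) (_h : m < l.length), l[m] = '0')
    (hi : i < l.length) (hne : l[i] ≠ '0') :
    l.dropWhile (fun c => c == '0') = l.drop i := by
  induction l generalizing i with
  | nil => simp at hi
  | cons c t ih =>
    cases i with
    | zero => simp at hne; simp [hne]
    | succ j =>
      have hc : c = '0' := hall 0 (by omega) (by simp)
      subst hc
      simp only [List.dropWhile_cons, beq_self_eq_true, if_true, List.drop_succ_cons]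
      exact ih j (fun m _ h => hall (m+1) (by omega) (by simpa using h))
        (by simpa using hi) (by simpa using hne)


theorem pv_findfrac (frac : List Char) (j : Nat) (hj : j < frac.length)
    (hne : frac[j] ≠ '0') (hall : ∀ m (_hm : m < j) (_h : m < frac.length), frac[m] = '0') :
    ∀ k, k ≤ j →
      pvAFindFrac frac (PySem.List.enumerate (frac.drop k) k) =
        some (-((j : Int) + 1), frac[j] :: '.' :: frac.drop (j + 1)) := by
  intro k hk
  have hterm : j - k < j - k + 1 := by omega
  induction hd : j - k generalizing k with
  | zero =>
    have hkj : k = j := by omega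
    subst hkj
    rw [List.drop_eq_getElem_cons hj, PySem.List.enumerate_cons]
    simp only [pvAFindFrac]
    rw [if_pos (by simpa using hne)]
    have hget : PySem.List.pyGet? frac ((k : Nat) : Int) = some frac[k] := by
      rw [PySem.List.pyGet?_natCast]; simp [List.getElem?_eq_getElem hj]
    rw [hget]
    have hslice : PySem.List.slice frac (some ((k : Int) + 1)) none = frac.drop (k + 1) := by
      have : ((k : Int) + 1) = ((k + 1 : Nat) : Int) := by push_cast; ring
      rw [this, PySem.List.slice_from_natCast]
    rw [hslice]
  | succ n ih =>
    have hklt : k < j := by omega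
    have hkl : k < frac.length := by omega
    rw [List.drop_eq_getElem_cons hkl, PySem.List.enumerate_cons]
    simp only [pvAFindFrac]
    rw [if_neg (by simp [hall k hklt hkl])]
    have : (k : Int) + 1 = ((k + 1 : Nat) : Int) := by push_cast; ring
    rw [this]
    exact ih (k + 1) (by omega) (by omega) (by omega)


theorem pv_isIn_guard {c : Char} {l : List Char}
    (hall : l.all (fun ch => ch == '0' || ch == '.' || ch == ',') = true)
    (hc : c ∈ l) : c = '0' ∨ c = '.' ∨ c = ',' := by
  have h := List.all_eq_true.mp hall c hc
  simp at h
  tauto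

theorem pv_core (sign : List Char) (g : Bool) (parts : List (List Char))
    (H : g = true → ∀ p ∈ parts, ∀ c ∈ p, c = '0') :
    (if g then "0" else pvACore sign parts) = pvBCore sign parts := by
  unfold pvACore pvBCore
  set p0 := parts.headD [] with hp0def
  set frac := (if 1 < parts.length then parts.getD 1 [] else []) with hfracdef
  cases hfind : (p0 ++ frac).findIdx? (fun c => c != '0') with
  | none =>
    have hz : ∀ c ∈ p0 ++ frac, c = '0' := by
      intro c hc
      have := List.findIdx?_eq_none_iff.mp hfind c hc
      simpa using this
    have h1 : List.dropWhile (fun c => c == '0') p0 = [] :=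
      List.dropWhile_eq_nil_iff.mpr (fun c hc => by simp [hz c (List.mem_append_left _ hc)])
    have h2 : List.dropWhile (fun c => c == '0') (['0'] ++ frac) = [] :=
      List.dropWhile_eq_nil_iff.mpr (fun c hc => by
        rcases List.mem_cons.mp hc with rfl | hc'
        · simp
        · simp [hz c (List.mem_append_right _ hc')])
    by_cases hg : g = true
    · simp [hg, hfind]
    · simp [hg, hfind, h1]
      intro x hx hxne
      exact absurd (hz x (List.mem_append_right _ hx)) hxne
  | some i =>
    obtain ⟨hi, hpi, hprev⟩ := List.findIdx?_eq_some_iff_getElem.mp hfind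
    have hne : (p0 ++ frac)[i] ≠ '0' := by simpa using hpi
    have hzero : ∀ m (hm : m < i) (h : m < (p0 ++ frac).length), (p0 ++ frac)[m] = '0' := by
      intro m hm h
      have := hprev m hm
      simpa using this
    obtain ⟨c0, hcmem, hcne⟩ : ∃ c ∈ p0 ++ frac, c ≠ '0' := ⟨_, List.getElem_mem _, hne⟩
    have hg : ¬ g = true := by
      intro hgt
      rcases List.mem_append.mp hcmem with h | h
      · have hp : p0 ∈ parts := by
          cases parts with
          | nil => rw [hp0def] at h; simp at h
          | cons a t => rw [hp0def]; simp
        exact hcne (H hgt p0 hp _ h)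
      · by_cases hlen : 1 < parts.length
        · have hp : frac ∈ parts := by
            rw [hfracdef, if_pos hlen, List.getD_eq_getElem _ _ (by omega)]
            exact List.getElem_mem _
          exact hcne (H hgt frac hp _ h)
        · rw [hfracdef, if_neg hlen] at h; simp at h
    simp only [if_neg hg, hfind]
    by_cases hlt : i < p0.length
    · have hp0i : p0[i] ≠ '0' := by
        rw [← List.getElem_append_left hlt]
        · exact hne
      have h1 : List.dropWhile (fun c => c == '0') p0 = p0.drop i := by
        apply pv_dropWhile_eq_drop p0 i _ hlt hp0i
        intro m hm h
        rw [← List.getElem_append_left (bs := frac) h]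
        exact hzero m hm (by simp; omega)
      have hcons : p0.drop i = p0[i] :: p0.drop (i + 1) := List.drop_eq_getElem_cons hlt
      have hdropne : ¬ (p0.drop i = []) := by
        simp [List.drop_eq_nil_iff]; omega
      have h2 : List.dropWhile (fun c => c == '0') (p0.drop i ++ frac)
          = p0[i] :: (p0.drop (i + 1) ++ frac) := by
        have hb : (p0[i] == '0') = false := by simpa using hp0i
        rw [List.drop_eq_getElem_cons hlt, List.cons_append, List.dropWhile_cons, hb]
        simp
      have hconsne : ¬ (p0[i] :: (p0.drop (i + 1) ++ frac) = ['0']) := by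
        simp [hp0i]
      have hipne : ¬ (p0.drop i = ['0']) := by
        intro hEq
        rw [hcons] at hEq
        injection hEq with hEq1 hEq2
        exact hp0i hEq1
      have hisin : PySem.Chars.isIn ['.'] (p0[i] :: '.' :: (p0.drop (i+1) ++ frac)) = true :=
        (PySem.Chars.isIn_iff_infix _ _).mpr ⟨[p0[i]], p0.drop (i+1) ++ frac, by simp⟩
      have hslice1 : PySem.List.slice (p0[i] :: (p0.drop (i+1) ++ frac)) (some 1) none = p0.drop (i+1) ++ frac := by
        rw [PySem.List.slice_from_one]
        simp
      have hgetd : (p0 ++ frac).getD i default = p0[i] := by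
        rw [List.getD_eq_getElem _ _ hi, List.getElem_append_left hlt]
      have hsliceB : PySem.List.slice (p0 ++ frac) (some ((i : Int) + 1)) none = p0.drop (i+1) ++ frac := by
        have hc : ((i : Int) + 1) = ((i + 1 : Nat) : Int) := by push_cast; ring
        rw [hc, PySem.List.slice_from_natCast, List.drop_append_of_le_length (by omega)]
      have hexp : (((p0.drop i).length : Int) - 1) = (p0.length : Int) - 1 - (i : Int) := by
        simp [List.length_drop]; omega
      simp only [h1, if_neg hdropne, h2, if_pos hipne]
      have hget2 : (p0 ++ frac)[i]?.getD 'A' = p0[i] := by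
        rw [List.getElem?_eq_getElem hi]
        simp [List.getElem_append_left hlt]
      have hexp2 : ((p0.length - i : Nat) : Int) - 1 = (p0.length : Int) - 1 - (i : Int) := by omega
      simp [hisin, hslice1, hsliceB, hconsne]
      rw [hget2, hexp2]
    · have hge : p0.length ≤ i := by omega
      have hj : i - p0.length < frac.length := by
        have := hi
        simp [List.length_append] at this
        omega
      have hfj : frac[i - p0.length] ≠ '0' := by
        rw [← List.getElem_append_right hge]
        exact hne
      have hzf : ∀ m (hm : m < i - p0.length) (h : m < frac.length), frac[m] = '0' := by
        intro m hm h
        have := hzero (p0.length + m) (by omega) (by simp [List.length_append]; omega)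
        rw [List.getElem_append_right (by omega)] at this
        simpa using this
      have h1 : List.dropWhile (fun c => c == '0') p0 = [] := by
        apply List.dropWhile_eq_nil_iff.mpr
        intro c hc
        obtain ⟨k, hk, rfl⟩ := List.mem_iff_getElem.mp hc
        have := hzero k (by omega) (by simp [List.length_append]; omega)
        rw [List.getElem_append_left hk] at this
        simp [this]
      have h2 : List.dropWhile (fun c => c == '0') frac = frac.drop (i - p0.length) :=
        pv_dropWhile_eq_drop frac (i - p0.length) hzf hj hfj
      have hdj : frac.drop (i - p0.length) = frac[i - p0.length] :: frac.drop (i - p0.length + 1) :=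
        List.drop_eq_getElem_cons hj
      have hdropne : ¬ (frac.drop (i - p0.length) = []) := by
        simp [List.drop_eq_nil_iff]; omega
      have hsdne : ¬ (frac.drop (i - p0.length) = ['0']) := by
        intro hEq
        rw [hdj] at hEq
        injection hEq with hEq1 hEq2
        exact hfj hEq1
      have hfrs := pv_findfrac frac (i - p0.length) hj hfj hzf 0 (by omega)
      rw [List.drop_zero] at hfrs
      rw [show ((0 : Nat) : Int) = (0 : Int) from rfl] at hfrs
      have hisin : PySem.Chars.isIn ['.'] (frac[i - p0.length] :: '.' :: frac.drop (i - p0.length + 1)) = true :=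
        (PySem.Chars.isIn_iff_infix _ _).mpr ⟨[frac[i - p0.length]], frac.drop (i - p0.length + 1), by simp⟩
      have hget2 : (p0 ++ frac)[i]?.getD 'A' = frac[i - p0.length] := by
        rw [List.getElem?_eq_getElem hi]
        simp [List.getElem_append_right hge]
      have hsliceB : PySem.List.slice (p0 ++ frac) (some ((i : Int) + 1)) none = frac.drop (i - p0.length + 1) := by
        have hc : ((i : Int) + 1) = ((i + 1 : Nat) : Int) := by push_cast; ring
        rw [hc, PySem.List.slice_from_natCast, List.drop_append,
          List.drop_eq_nil_of_le (by omega), Nat.sub_add_comm hge]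
        simp
      have hexp : -(((i - p0.length : Nat) : Int) + 1) = (p0.length : Int) - 1 - (i : Int) := by omega
      simp only [h1, List.singleton_append, List.dropWhile_cons, beq_self_eq_true,
        if_true, h2, if_neg hdropne, if_neg hsdne, hfrs]
      simp [hisin, hget2, hsliceB, hexp]


theorem pv_tails_eq (sign pv0 : List Char) : pvATail sign pv0 = pvBTail sign pv0 := by
  unfold pvATail pvBTail
  apply pv_core
  intro hg p hp c hc
  obtain ⟨hcpv, hcdot⟩ := pv_splitOn_mem _ p hp c hc
  have hcomma : c ≠ ',' := by
    rw [pv_replace_comma] at hcpv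
    obtain ⟨d, _, hd⟩ := List.mem_map.mp hcpv
    intro hEq
    by_cases hd' : (d == ',') = true
    · rw [if_pos hd'] at hd; rw [← hd] at hEq; exact absurd hEq (by decide)
    · rw [if_neg hd'] at hd; rw [← hd] at hEq; subst hEq; simp at hd'
  rcases pv_isIn_guard hg hcpv with h | h | h
  · exact h
  · exact absurd h hcdot
  · exact absurd h hcomma

-- ===== VERDICT (by name: the statement is the Claim_ definition above) =====
theorem normalizeHexadecimalNumber_spec : Claim_equal_normalizeHexadecimalNumber := by
  intro inputValue _
  unfold Spec_normalizeHexadecimalNumber normalizeHexadecimalNumber normalizeHexadecimalNumber_alt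
  by_cases h1 : PySem.Chars.startswith inputValue.toList ['-'] <;>
    by_cases h2 : PySem.Chars.startswith inputValue.toList ['+'] <;>
      simp [h1, h2, pv_tails_eq]
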